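-- pv_equiv track=rewrite | github.com/thirupathireddy665/crossbeam | src/bustle_generated_properties.py | is_contains_space
-- ===== SOURCE A (Python) =====
-- AllTrue = -1
--
-- Mixed = 0
--
-- AllFalse = 1
--
-- def is_contains_space(inputs):
--     is_true_present = False
--     is_false_present = False
--     for program_input in inputs:
--         if " " in program_input:
--             is_true_present = True
--         else:
--             is_false_present = True
--
--     if is_true_present and is_false_present:
--         return Mixed
--     elif is_true_present:
--         return AllTrue
--     else:
--         return AllFalse
-- ===== SOURCE B (Python) =====
-- AllTrue = -1
-- Mixed = 0
-- AllFalse = 1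
--
-- def is_contains_space(inputs):
--     it = iter(inputs)
--     for first in it:
--         base = " " in first
--         for p in it:
--             if (" " in p) != base:
--                 return Mixed
--         return AllTrue if base else AllFalse
--     return AllFalse
-- ===== Notes on version B (the rewrite author's own statement) =====
-- stated objective: alternative
-- what changed: Instead of accumulating two boolean flags over the whole list, B takes the first element's class (' ' in it) as a baseline and scans the remainder with an early exit: the first element whose class disagrees returns Mixed immediately; if the scan finishes, the baseline decides AllTrue/AllFalse (empty input yields AllFalse).
import Mathlib
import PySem

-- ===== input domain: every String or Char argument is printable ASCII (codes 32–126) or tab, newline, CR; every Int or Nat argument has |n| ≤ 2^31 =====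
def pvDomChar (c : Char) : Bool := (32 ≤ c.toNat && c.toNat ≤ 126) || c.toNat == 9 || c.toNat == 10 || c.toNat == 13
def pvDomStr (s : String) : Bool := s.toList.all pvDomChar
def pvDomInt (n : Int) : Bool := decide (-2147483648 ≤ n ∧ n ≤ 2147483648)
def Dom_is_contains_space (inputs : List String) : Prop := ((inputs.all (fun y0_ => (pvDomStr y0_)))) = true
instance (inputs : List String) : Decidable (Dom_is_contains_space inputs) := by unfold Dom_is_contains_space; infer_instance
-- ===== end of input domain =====

-- B replaces A's two accumulated boolean flags by a baseline-and-early-exit scan: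
-- the first element fixes the class, the first disagreeing element returns Mixed
-- immediately (objective: alternative decomposition, not claimed faster).

-- ===== PORT A =====
-- loop accumulating (is_true_present, is_false_present)
def is_contains_space (inputs : List String) : Int :=
  let st := inputs.foldl
    (fun (st : Bool × Bool) program_input =>
      if PySem.Str.isIn " " program_input then (true, st.2) else (st.1, true))
    (false, false)
  if st.1 && st.2 then 0
  else if st.1 then -1
  else 1

-- ===== PORT B =====
-- inner loop of Source B: scan the rest against the baseline, early exit to Mixed
def pvScanRest (base : Bool) : List String → Int
  | [] => if base then -1 else 1
  | p :: rest =>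
    if (PySem.Str.isIn " " p) != base then 0 else pvScanRest base rest

def is_contains_space_alt : List String → Int
  | [] => 1
  | first :: rest => pvScanRest (PySem.Str.isIn " " first) rest

-- ===== PRECONDITION & SPEC =====
def Spec_is_contains_space (inputs : List String) (out : Int) : Prop := out = is_contains_space_alt inputs
instance (inputs : List String) (out : Int) : Decidable (Spec_is_contains_space inputs out) := by unfold Spec_is_contains_space; infer_instance

-- ===== CLAIM (what is proved, stated in full; the proofs are below) =====
def Claim_equal_is_contains_space : Prop := ∀ (inputs : List String), Dom_is_contains_space inputs → Spec_is_contains_space inputs (is_contains_space inputs)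

-- ===== LEMMAS AND PROOFS =====

-- generic version of B's inner scan, over an abstract predicate q
def pvScanRestG (q : String → Bool) (base : Bool) : List String → Int
  | [] => if base then -1 else 1
  | p :: rest => if q p != base then 0 else pvScanRestG q base rest

theorem pvScanRest_eq (base : Bool) (xs : List String) :
    pvScanRest base xs = pvScanRestG (fun p => PySem.Str.isIn " " p) base xs := by
  induction xs with
  | nil => rfl
  | cons x xs ih => simp only [pvScanRest, pvScanRestG, ih]

-- A's fold computes: flag1 = old flag1 OR some item satisfies q; flag2 = old flag2 OR some item does not.
theorem pv_fold_flags (q : String → Bool) (xs : List String) (t f : Bool) :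
    xs.foldl (fun (st : Bool × Bool) p =>
        if q p then (true, st.2) else (st.1, true)) (t, f)
    = (t || xs.any q, f || xs.any (fun p => !q p)) := by
  induction xs generalizing t f with
  | nil => simp
  | cons x xs ih =>
    simp only [List.foldl_cons, List.any_cons]
    by_cases h : q x = true
    · rw [if_pos h, ih]; simp [h]
    · rw [if_neg h, ih]
      simp only [Bool.not_eq_true] at h
      simp [h]

-- B's scan returns 0 iff some element disagrees with the baseline, else the baseline's verdict.
theorem pv_scanG (q : String → Bool) (base : Bool) (xs : List String) :
    pvScanRestG q base xs
    = if xs.any (fun p => q p != base) then 0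
      else if base then -1 else 1 := by
  induction xs with
  | nil => simp [pvScanRestG]
  | cons x xs ih =>
    simp only [pvScanRestG, List.any_cons, ih]
    by_cases hx : (q x != base) = true
    · rw [if_pos hx]; simp [hx]
    · rw [if_neg hx]
      simp only [Bool.not_eq_true] at hx
      simp [hx]

-- ===== VERDICT (by name: the statement is the Claim_ definition above) =====
theorem is_contains_space_spec : Claim_equal_is_contains_space := by
  intro inputs _
  unfold Spec_is_contains_space
  cases inputs with
  | nil => rfl
  | cons first rest =>
    show is_contains_space (first :: rest) = pvScanRest (PySem.Str.isIn " " first) rest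
    rw [pvScanRest_eq, pv_scanG]
    unfold is_contains_space
    simp only [pv_fold_flags (fun p => PySem.Str.isIn " " p), List.any_cons, Bool.false_or]
    cases hb : PySem.Str.isIn " " first
    · have he : (fun p => PySem.Str.isIn " " p != false) = (fun p => PySem.Str.isIn " " p) :=
        funext fun p => by cases PySem.Str.isIn " " p <;> rfl
      rw [he]
      cases h1 : rest.any (fun p => PySem.Str.isIn " " p) <;> simp
    · have he : (fun p => PySem.Str.isIn " " p != true) = (fun p => !PySem.Str.isIn " " p) :=
        funext fun p => by cases PySem.Str.isIn " " p <;> rfl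
      rw [he]
      cases h2 : rest.any (fun p => !PySem.Str.isIn " " p) <;> simp
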